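-- pv_equiv track=rewrite | github.com/yutao-li/leetcode | facebook/prefix_strings.py | solution
-- ===== SOURCE A (Python) =====
-- def solution(strings: [str], sources: [str]) -> [bool]:
--     prefix = dict()
--     i = 0
--     cur = ''
--     for s in strings:
--         i += len(s)
--         cur += s
--         prefix[i] = cur
--     return [prefix.get(len(s), '') == s for s in sources]
--
-- strings = ['one', 'twothree', 'four']
--
-- sources = ['one', 'onetwo']
-- ===== SOURCE B (Python) =====
-- def solution(strings: [str], sources: [str]) -> [bool]:
--     # Per-query greedy scan: a source is a cumulative prefix iff it can be peeled
--     # string by string from the front, ending exactly at a string boundary.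
--     # No joined string, no dict/set of boundaries is ever built.
--     def matches(s):
--         pos = 0
--         n = len(s)
--         for t in strings:
--             if pos == n:
--                 return True
--             if not s.startswith(t, pos):
--                 return False
--             pos += len(t)
--         return pos == n
--     return [matches(s) for s in sources]
-- ===== Notes on version B (the rewrite author's own statement) =====
-- stated objective: faster
-- what changed: A precomputes a dict mapping every cumulative length to the accumulated prefix string (quadratic total size) and answers each source by one lookup; B builds no structure at all and answers each source by a greedy front-to-back scan that peels the given strings off the source one by one, succeeding iff it ends exactly on a string boundary.
import Mathlib
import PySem

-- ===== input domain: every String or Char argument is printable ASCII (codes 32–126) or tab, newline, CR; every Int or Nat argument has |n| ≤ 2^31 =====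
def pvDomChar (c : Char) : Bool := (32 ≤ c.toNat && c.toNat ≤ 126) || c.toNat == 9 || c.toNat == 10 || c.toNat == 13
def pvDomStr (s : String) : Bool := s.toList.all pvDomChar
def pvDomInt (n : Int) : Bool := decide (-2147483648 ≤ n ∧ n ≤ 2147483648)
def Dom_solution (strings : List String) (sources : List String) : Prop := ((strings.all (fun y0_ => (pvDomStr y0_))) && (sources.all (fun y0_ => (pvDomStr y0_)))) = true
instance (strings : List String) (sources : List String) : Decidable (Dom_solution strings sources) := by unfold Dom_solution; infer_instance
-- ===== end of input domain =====

-- B replaces A's precomputed dict of all cumulative prefix strings by a per-source greedy scan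
-- that peels the given strings off the front of the source (alternative algorithm; no structure built).
-- Strings are ported at the code-point (List Char) level via PySem, exact on the stated domain.

-- ===== PORT A =====
def solution (strings : List String) (sources : List String) : List Bool :=
  let st := strings.foldl
    (fun acc s =>
      let i := acc.2.1 + PySem.Str.len s
      let cur := acc.2.2 ++ s.toList
      (PySem.Dict.insert acc.1 i cur, i, cur))
    ((PySem.Dict.empty : PySem.Dict Int (List Char)), (0 : Int), ([] : List Char))
  sources.map (fun s => PySem.Dict.getD st.1 (PySem.Str.len s) [] == s.toList)

-- ===== PORT B =====
-- Source B's inner 'matches': the loop state 'pos' is carried as the remaining suffix s[pos:];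
-- 'pos == n' is 'rem = []' and Python's s.startswith(t, pos) is exactly t.toList.isPrefixOf rem
-- (the loop maintains 0 ≤ pos ≤ n), so the port is exact code-point for code-point.
def pvMatches : List String → List Char → Bool
  | [], rem => rem == ([] : List Char)
  | t :: ts, rem =>
      if rem == ([] : List Char) then true
      else if !(t.toList.isPrefixOf rem) then false
      else pvMatches ts (rem.drop t.toList.length)

def solution_alt (strings : List String) (sources : List String) : List Bool :=
  sources.map (fun s => pvMatches strings s.toList)

-- ===== PRECONDITION & SPEC =====
def Spec_solution (strings : List String) (sources : List String) (out : List Bool) : Prop := out = solution_alt strings sources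
instance (strings : List String) (sources : List String) (out : List Bool) : Decidable (Spec_solution strings sources out) := by unfold Spec_solution; infer_instance

-- ===== CLAIM (what is proved, stated in full; the proofs are below) =====
def Claim_equal_solution : Prop := ∀ (strings : List String) (sources : List String), Dom_solution strings sources → Spec_solution strings sources (solution strings sources)

-- ===== LEMMAS AND PROOFS =====

-- the cumulative prefixes of cur ++ (concatenation of L), strictly beyond cur
def pvExt : List Char → List String → List (List Char)
  | _, [] => []
  | cur, t :: ts => (cur ++ t.toList) :: pvExt (cur ++ t.toList) ts

lemma pv_ext_append (L : List String) : ∀ (a b : List Char),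
    pvExt (a ++ b) L = (pvExt b L).map (a ++ ·) := by
  induction L with
  | nil => intro a b; rfl
  | cons t ts ih =>
      intro a b
      simp only [pvExt, List.map_cons, List.append_assoc, ih a (b ++ t.toList)]

-- A-side loop invariant: after folding L, a lookup at length |s| succeeds with value s
-- exactly when s is one of the already-recorded prefixes P or a new cumulative prefix.
lemma pv_A_inv (L : List String) :
    ∀ (d : PySem.Dict Int (List Char)) (cur : List Char) (P : List (List Char)),
    (∀ s : List Char, (PySem.Dict.getD d (s.length : Int) [] == s) = decide (s ∈ P)) →
    (∀ v ∈ P, v <+: cur) →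
    ∀ s : List Char,
      (PySem.Dict.getD (L.foldl (fun acc t =>
          let i := acc.2.1 + PySem.Str.len t
          let cur := acc.2.2 ++ t.toList
          (PySem.Dict.insert acc.1 i cur, i, cur)) (d, (cur.length : Int), cur)).1
        (s.length : Int) [] == s)
      = decide (s ∈ P ∨ s ∈ pvExt cur L) := by
  induction L with
  | nil =>
      intro d cur P h _ s
      simp only [List.foldl_nil, pvExt, List.not_mem_nil, or_false, h s]
  | cons t ts ih =>
      intro d cur P h h2 s
      simp only [List.foldl_cons]
      have hi : (cur.length : Int) + PySem.Str.len t = (((cur ++ t.toList).length : Int)) := by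
        rw [PySem.Str.len_eq]; push_cast [List.length_append]; ring
      rw [hi]
      have h' : ∀ s : List Char,
          (PySem.Dict.getD (PySem.Dict.insert d (((cur ++ t.toList).length : Int)) (cur ++ t.toList))
            (s.length : Int) [] == s) = decide (s ∈ (cur ++ t.toList) :: P) := by
        intro s
        rw [PySem.Dict.getD_insert]
        by_cases hl : (s.length : Int) = ((cur ++ t.toList).length : Int)
        · rw [if_pos hl]
          by_cases hs : s = cur ++ t.toList
          · subst hs; simp
          · have hnP : s ∉ P := by
              intro hsP
              exact hs (List.IsPrefix.eq_of_length
                ((h2 s hsP).trans (List.prefix_append cur t.toList)) (by exact_mod_cast hl))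
            simp [hs, Ne.symm hs, hnP]
        · rw [if_neg hl]
          have hs : s ≠ cur ++ t.toList := by
            intro hh; exact hl (by rw [hh])
          simp [h s, hs]
      have h2' : ∀ v ∈ (cur ++ t.toList) :: P, v <+: cur ++ t.toList := by
        intro v hv
        rcases List.mem_cons.1 hv with hv | hv
        · exact hv ▸ List.prefix_refl _
        · exact (h2 v hv).trans (List.prefix_append cur t.toList)
      have := ih (PySem.Dict.insert d (((cur ++ t.toList).length : Int)) (cur ++ t.toList))
        (cur ++ t.toList) ((cur ++ t.toList) :: P) h' h2' s
      rw [this]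
      rw [decide_eq_decide]
      simp only [pvExt, List.mem_cons]
      tauto

-- B-side characterisation: the greedy scan accepts rem iff rem is [] or a cumulative prefix.
lemma pv_B_char (L : List String) : ∀ rem : List Char,
    pvMatches L rem = decide (rem = [] ∨ rem ∈ pvExt [] L) := by
  induction L with
  | nil => intro rem; cases rem <;> simp [pvMatches, pvExt]
  | cons t ts ih =>
      intro rem
      have hext : pvExt t.toList ts = (pvExt [] ts).map (t.toList ++ ·) := by
        have := pv_ext_append ts t.toList []
        simpa using this
      by_cases h0 : rem = []
      · subst h0; simp [pvMatches, pvExt]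
      · by_cases hp : t.toList <+: rem
        · obtain ⟨rest, hrest⟩ := hp
          have hpre : (t.toList.isPrefixOf rem) = true := by
            rw [List.isPrefixOf_iff_prefix]; exact ⟨rest, hrest⟩
          have hdrop : rem.drop t.length = rest := by
            rw [← hrest]; simp
          have lhs : pvMatches (t :: ts) rem = pvMatches ts rest := by
            simp [pvMatches, h0, hpre, hdrop]
          rw [lhs, ih rest, decide_eq_decide]
          simp only [pvExt, List.nil_append, List.mem_cons, hext, List.mem_map]
          subst hrest
          constructor
          · rintro (h | h)
            · subst h; simp
            · exact Or.inr (Or.inr ⟨rest, h, rfl⟩)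
          · rintro (h | h | ⟨x, hx, hxe⟩)
            · exact absurd h h0
            · left
              have hl := congrArg List.length h
              simp at hl
              simp [hl]
            · right
              have hrx : rest = x := List.append_cancel_left hxe.symm
              exact hrx ▸ hx
        · have hpre : (t.toList.isPrefixOf rem) = false := by
            rw [Bool.eq_false_iff]
            intro hh; exact hp (List.isPrefixOf_iff_prefix.1 hh)
          have lhs : pvMatches (t :: ts) rem = false := by
            rw [pvMatches]
            simp [h0, hpre]
          rw [lhs]
          symm
          rw [decide_eq_false_iff_not]
          rintro (h | h)
          · exact h0 h
          · simp only [pvExt, List.nil_append, List.mem_cons, hext, List.mem_map] at h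
            rcases h with h | ⟨x, _, hxe⟩
            · exact hp (h ▸ ⟨[], by simp⟩)
            · exact hp ⟨x, hxe⟩

-- ===== VERDICT (by name: the statement is the Claim_ definition above) =====
theorem solution_spec : Claim_equal_solution := by
  intro strings sources _
  unfold Spec_solution solution solution_alt
  refine List.map_congr_left ?_
  intro s _
  have h0 : ∀ t : List Char,
      (PySem.Dict.getD (PySem.Dict.empty : PySem.Dict Int (List Char)) (t.length : Int) [] == t)
        = decide (t ∈ ([[]] : List (List Char))) := by
    intro t
    rw [PySem.Dict.getD_empty]
    cases t <;> simp
  have h2 : ∀ v ∈ ([[]] : List (List Char)), v <+: ([] : List Char) := by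
    intro v hv
    rcases List.mem_cons.1 hv with hv | hv
    · exact hv ▸ List.prefix_refl _
    · exact absurd hv (List.not_mem_nil)
  have hA := pv_A_inv strings (PySem.Dict.empty : PySem.Dict Int (List Char)) [] [[]] h0 h2 s.toList
  simp only [List.length_nil, Nat.cast_zero] at hA
  rw [PySem.Str.len_eq, pv_B_char strings s.toList]
  exact hA.trans (by rw [decide_eq_decide]; simp)
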